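-- pv_equiv track=rewrite | github.com/VoltusV5/AI-Gym-Coach | scripts/fetch_exercise_media.py | get_exercise_thumbnail_url
-- ===== SOURCE A (Python) =====
-- def get_exercise_thumbnail_url(info: dict) -> str | None:
--     """Extract first JPEG/PNG thumbnail from wger exerciseinfo response."""
--     images = info.get("images", []) or []
--     for img in images:
--         img_url = img.get("image", "")
--         if img_url and not img_url.lower().endswith(".gif"):
--             return img_url
--     for img in images:
--         img_url = img.get("image", "")
--         if img_url:
--             return img_url
--     return None
-- ===== SOURCE B (Python) =====
-- def get_exercise_thumbnail_url(info: dict) -> str | None: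
--     """Extract first JPEG/PNG thumbnail from wger exerciseinfo response.
--
--     Single pass: return the first non-gif URL immediately; remember the
--     first non-empty URL as a fallback and return it after the loop.
--     """
--     images = info.get("images", []) or []
--     fallback = None
--     for img in images:
--         img_url = img.get("image", "")
--         if img_url:
--             if not img_url.lower().endswith(".gif"):
--                 return img_url
--             if fallback is None:
--                 fallback = img_url
--     return fallback
-- ===== Notes on version B (the rewrite author's own statement) =====
-- stated objective: simpler
-- what changed: Replaces A's two sequential scans over images with one loop that returns the first non-gif URL immediately and keeps the first non-empty URL as a fallback accumulator.
import Mathlib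
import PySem

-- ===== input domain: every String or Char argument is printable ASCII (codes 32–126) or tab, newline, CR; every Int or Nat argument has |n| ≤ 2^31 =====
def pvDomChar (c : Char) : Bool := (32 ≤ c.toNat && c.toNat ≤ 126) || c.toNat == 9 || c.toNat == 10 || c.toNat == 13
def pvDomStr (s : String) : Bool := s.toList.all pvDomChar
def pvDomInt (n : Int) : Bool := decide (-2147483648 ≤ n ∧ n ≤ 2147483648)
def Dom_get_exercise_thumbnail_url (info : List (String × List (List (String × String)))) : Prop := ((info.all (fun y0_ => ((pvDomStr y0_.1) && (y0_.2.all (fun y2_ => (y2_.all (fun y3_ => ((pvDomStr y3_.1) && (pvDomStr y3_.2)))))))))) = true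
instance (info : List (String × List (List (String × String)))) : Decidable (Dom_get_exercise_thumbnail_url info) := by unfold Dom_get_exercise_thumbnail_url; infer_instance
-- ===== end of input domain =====

-- B merges A's two scans over `images` into one pass with a `fallback` accumulator (objective: simpler).


-- ===== PORT A =====
-- first for-loop: first non-empty URL that does not end with ".gif" (lowercased)
def pvALoop1 : List (List (String × String)) → Option String
  | [] => none
  | img :: rest =>
    let img_url := PySem.Dict.getD ⟨img⟩ "image" ""
    if img_url ≠ "" ∧ PySem.Str.endswith (PySem.Str.lower img_url) ".gif" = false then
      some img_url
    else pvALoop1 rest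

-- second for-loop: first non-empty URL
def pvALoop2 : List (List (String × String)) → Option String
  | [] => none
  | img :: rest =>
    let img_url := PySem.Dict.getD ⟨img⟩ "image" ""
    if img_url ≠ "" then some img_url else pvALoop2 rest

def get_exercise_thumbnail_url (info : List (String × List (List (String × String)))) : Option String :=
  let images := PySem.Dict.getD ⟨info⟩ "images" []   -- `or []` is the identity on a list default
  match pvALoop1 images with
  | some u => some u
  | none => pvALoop2 images

-- ===== PORT B =====
-- single pass with a fallback accumulator (the first non-empty URL seen)
def pvBLoop : List (List (String × String)) → Option String → Option String
  | [], fallback => fallback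
  | img :: rest, fallback =>
    let img_url := PySem.Dict.getD ⟨img⟩ "image" ""
    if img_url ≠ "" then
      if PySem.Str.endswith (PySem.Str.lower img_url) ".gif" = false then some img_url
      else pvBLoop rest (if fallback.isNone then some img_url else fallback)
    else pvBLoop rest fallback

def get_exercise_thumbnail_url_alt (info : List (String × List (List (String × String)))) : Option String :=
  let images := PySem.Dict.getD ⟨info⟩ "images" []
  pvBLoop images none

-- ===== PRECONDITION & SPEC =====
def Spec_get_exercise_thumbnail_url (info : List (String × List (List (String × String)))) (out : Option String) : Prop := out = get_exercise_thumbnail_url_alt info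
instance (info : List (String × List (List (String × String)))) (out : Option String) : Decidable (Spec_get_exercise_thumbnail_url info out) := by unfold Spec_get_exercise_thumbnail_url; infer_instance

-- ===== CLAIM (what is proved, stated in full; the proofs are below) =====
def Claim_equal_get_exercise_thumbnail_url : Prop := ∀ (info : List (String × List (List (String × String)))), Dom_get_exercise_thumbnail_url info → Spec_get_exercise_thumbnail_url info (get_exercise_thumbnail_url info)

-- ===== LEMMAS AND PROOFS =====
-- If the first scan finds a non-gif URL, B's loop returns it regardless of the fallback.
theorem pvBLoop_of_loop1_some (imgs : List (List (String × String))) (u : String)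
    (h : pvALoop1 imgs = some u) : ∀ fb, pvBLoop imgs fb = some u := by
  induction imgs with
  | nil => simp [pvALoop1] at h
  | cons img rest ih =>
    intro fb
    simp only [pvALoop1] at h
    simp only [pvBLoop]
    by_cases hA : PySem.Dict.getD ⟨img⟩ "image" "" ≠ "" ∧
        PySem.Str.endswith (PySem.Str.lower (PySem.Dict.getD ⟨img⟩ "image" "")) ".gif" = false
    · rw [if_pos hA] at h
      rw [if_pos hA.1, if_pos hA.2]
      exact h
    · rw [if_neg hA] at h
      by_cases hu : PySem.Dict.getD ⟨img⟩ "image" "" ≠ ""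
      · have hgif : ¬ PySem.Str.endswith (PySem.Str.lower (PySem.Dict.getD ⟨img⟩ "image" "")) ".gif" = false := by
          intro hc; exact hA ⟨hu, hc⟩
        rw [if_pos hu, if_neg hgif]
        exact ih h _
      · rw [if_neg hu]
        exact ih h _

-- If every URL is empty or a gif, B's loop returns its fallback if set, else the first non-empty URL.
theorem pvBLoop_of_loop1_none (imgs : List (List (String × String)))
    (h : pvALoop1 imgs = none) :
    ∀ fb : Option String, pvBLoop imgs fb = (match fb with | some f => some f | none => pvALoop2 imgs) := by
  induction imgs with
  | nil => intro fb; cases fb <;> simp [pvBLoop, pvALoop2]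
  | cons img rest ih =>
    intro fb
    simp only [pvALoop1] at h
    split_ifs at h with h1
    simp only [pvBLoop, pvALoop2]
    by_cases hu : PySem.Dict.getD ⟨img⟩ "image" "" ≠ ""
    · have hgif : PySem.Str.endswith (PySem.Str.lower (PySem.Dict.getD ⟨img⟩ "image" "")) ".gif" ≠ false := by
        intro hc; exact h1 ⟨hu, hc⟩
      rw [if_pos hu, if_neg hgif]
      cases fb with
      | none => rw [ih h]; simp [hu]
      | some f => simp [ih h]
    · rw [if_neg hu, ih h]
      cases fb <;> simp_all

-- ===== VERDICT (by name: the statement is the Claim_ definition above) =====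
theorem get_exercise_thumbnail_url_spec : Claim_equal_get_exercise_thumbnail_url := by
  intro info _
  unfold Spec_get_exercise_thumbnail_url get_exercise_thumbnail_url get_exercise_thumbnail_url_alt
  cases h : pvALoop1 (PySem.Dict.getD ⟨info⟩ "images" []) with
  | some u => simp only [h]; exact (pvBLoop_of_loop1_some _ _ h none).symm
  | none => simp only [h]; exact (pvBLoop_of_loop1_none _ h none).symm
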